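-- pv_equiv track=rewrite | github.com/AndrewApollo628/GCIS_123 | Unit08/activities833.py | swapper
-- ===== SOURCE A (Python) =====
-- def swapper(a_list):
--     length = len(a_list)
--     if length < 2:
--         return a_list
--     else:
--         half = length // 2
--         swapped = []
--         for index in range(half, length):
--             swapped.append(a_list[index])
--         for index in range(half):
--             swapped.append(a_list[index])
--     return swapped
-- ===== SOURCE B (Python) =====
-- import collections
--
--
-- def swapper(a_list):
--     if len(a_list) < 2:
--         return a_list
--     half = len(a_list) // 2
--     d = collections.deque(a_list)
--     d.rotate(-half)
--     return list(d)
-- ===== Notes on version B (the rewrite author's own statement) =====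
-- stated objective: idiomatic
-- what changed: Replaces the two index-range append loops with a single left rotation by len//2 via collections.deque.rotate.
import Mathlib
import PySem

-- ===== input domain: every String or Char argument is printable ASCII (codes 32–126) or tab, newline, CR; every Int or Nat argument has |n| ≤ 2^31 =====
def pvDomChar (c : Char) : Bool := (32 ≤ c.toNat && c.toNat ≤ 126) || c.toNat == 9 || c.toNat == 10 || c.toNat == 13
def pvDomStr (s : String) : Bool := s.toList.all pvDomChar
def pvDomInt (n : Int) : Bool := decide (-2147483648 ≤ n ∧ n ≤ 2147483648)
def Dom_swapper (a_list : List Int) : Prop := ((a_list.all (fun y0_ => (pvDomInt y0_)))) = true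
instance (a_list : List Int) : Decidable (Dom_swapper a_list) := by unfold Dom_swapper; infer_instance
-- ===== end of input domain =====

-- B swaps the two halves by a single left rotation (deque.rotate(-half)) instead of two index-range append loops; objective: idiomatic.


-- ===== PORT A =====
def swapper (a_list : List Int) : List Int :=
  let length : Int := a_list.length
  if length < 2 then a_list
  else
    let half := PySem.Int.floordiv length 2
    let swapped : List Int := []
    let swapped := (PySem.List.pyRange half length 1).foldl
      (fun acc index => acc ++ [PySem.List.pyGetD a_list index 0]) swapped
    let swapped := (PySem.List.pyRange 0 half 1).foldl
      (fun acc index => acc ++ [PySem.List.pyGetD a_list index 0]) swapped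
    swapped

-- ===== PORT B =====
-- rotate the list left by half (deque.rotate(-half) then list(d))
def rotateLeft (xs : List Int) (k : Nat) : List Int := xs.drop k ++ xs.take k

def swapper_alt (a_list : List Int) : List Int :=
  if a_list.length < 2 then a_list
  else rotateLeft a_list (a_list.length / 2)

-- ===== PRECONDITION & SPEC =====
def Spec_swapper (a_list : List Int) (out : List Int) : Prop := out = swapper_alt a_list
instance (a_list : List Int) (out : List Int) : Decidable (Spec_swapper a_list out) := by unfold Spec_swapper; infer_instance

-- ===== CLAIM (what is proved, stated in full; the proofs are below) =====
def Claim_equal_swapper : Prop := ∀ (a_list : List Int), Dom_swapper a_list → Spec_swapper a_list (swapper a_list)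

-- ===== LEMMAS AND PROOFS =====
theorem map_getD_range_eq_take (xs : List Int) (h : Nat) (hh : h ≤ xs.length) :
    (List.range h).map (fun k => xs.getD k 0) = xs.take h := by
  apply List.ext_getElem
  · simp [hh]
  · intro i h1 h2
    have hix : i < xs.length := by simp at h2; omega
    simp_all [List.getD]

-- ===== VERDICT (by name: the statement is the Claim_ definition above) =====
theorem swapper_spec : Claim_equal_swapper := by
  unfold Claim_equal_swapper Spec_swapper swapper swapper_alt
  intro xs _
  simp only []
  by_cases hlt : (xs.length : Int) < 2
  · simp [hlt, show xs.length < 2 by exact_mod_cast hlt]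
  · have hge : ¬ xs.length < 2 := by
      intro h; exact hlt (by exact_mod_cast Nat.cast_lt_ofNat.mpr h)
    rw [if_neg hlt, if_neg hge]
    have hfd : PySem.Int.floordiv (xs.length : Int) 2 = ((xs.length / 2 : Nat) : Int) := by
      rw [PySem.Int.floordiv, Int.fdiv_eq_ediv]
      simp
    rw [hfd]
    rw [PySem.List.foldl_pyRange_pyGetD' xs 0 (fun acc x => acc ++ [x]) []
      (by positivity)]
    rw [PySem.List.foldl_append_singleton, PySem.List.pyRange_zero_natCast,
      PySem.List.foldl_append_singleton_eq_map, List.map_map]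
    rw [show ((fun index => PySem.List.pyGetD xs index 0) ∘ fun k : Nat => (k : Int))
        = (fun k => xs.getD k 0) from by funext k; exact PySem.List.pyGetD_natCast xs k 0]
    rw [map_getD_range_eq_take xs _ (Nat.div_le_self _ _)]
    simp [rotateLeft]
    omega
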